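-- pv_equiv track=rewrite | github.com/nmicic/cunningham-chain-search | visualizations/p1-analysis/generate_2adic_p1.py | get_3d_pos
-- ===== SOURCE A (Python) =====
-- from typing import Optional
--
-- def get_3d_pos(n: int, D: int) -> Optional[tuple]:
--     if n <= 0: return None
--     D2 = D * D
--     bottom, level = n, 0
--     while bottom < D2:  bottom *= 2;  level += 1
--     while bottom >= 2*D2: bottom //= 2; level -= 1
--     if D2 <= bottom < 2*D2:
--         idx = bottom - D2
--         return (idx % D, level, idx // D, bottom)
--     return None
-- ===== SOURCE B (Python) =====
-- def get_3d_pos(n, D):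
--     # Closed-form level via bit_length instead of A's doubling/halving loops.
--     if n <= 0:
--         return None
--     D2 = D * D
--     if n < D2:
--         level = ((D2 - 1) // n).bit_length()
--         bottom = n * 2 ** level
--     else:
--         k = (n // D2).bit_length() - 1
--         bottom = n // 2 ** k
--         level = -k
--     idx = bottom - D2
--     return (idx % D, level, idx // D, bottom)
-- ===== Notes on version B (the rewrite author's own statement) =====
-- stated objective: faster
-- what changed: Replaces A's two while-loops (repeated doubling below D^2, repeated halving above 2*D^2) by a shift count computed in closed form with int.bit_length; Pre_ excludes n > 0 with D = 0, where A's halving loop never terminates (and B raises ZeroDivisionError), so neither program returns there.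
import Mathlib
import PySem

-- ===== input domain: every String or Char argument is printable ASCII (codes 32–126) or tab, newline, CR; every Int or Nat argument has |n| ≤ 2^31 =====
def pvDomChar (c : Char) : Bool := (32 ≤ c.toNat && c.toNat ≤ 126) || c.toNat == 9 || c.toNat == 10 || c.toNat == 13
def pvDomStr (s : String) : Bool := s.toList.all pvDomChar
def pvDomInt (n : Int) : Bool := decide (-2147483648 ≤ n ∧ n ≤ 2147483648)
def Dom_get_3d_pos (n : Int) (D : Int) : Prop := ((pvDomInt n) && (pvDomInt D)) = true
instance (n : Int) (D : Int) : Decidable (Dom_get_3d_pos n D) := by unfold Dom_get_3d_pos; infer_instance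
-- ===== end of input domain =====

-- B replaces A's doubling/halving while-loops by a shift count computed in closed form with bit_length.

-- ===== PORT A =====
-- `while bottom < D2: bottom *= 2; level += 1` as fuel recursion; on Dom ∩ Pre_ the loop
-- runs at most 62 times, so fuel 128 is never exhausted there.
def pvLoopDouble (D2 : Int) : Nat → Int × Int → Int × Int
  | 0, s => s
  | fuel + 1, (bottom, level) =>
    if bottom < D2 then pvLoopDouble D2 fuel (bottom * 2, level + 1) else (bottom, level)

-- `while bottom >= 2*D2: bottom //= 2; level -= 1`; at most 31 iterations on Dom ∩ Pre_.
def pvLoopHalve (D2 : Int) : Nat → Int × Int → Int × Int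
  | 0, s => s
  | fuel + 1, (bottom, level) =>
    if 2 * D2 ≤ bottom then pvLoopHalve D2 fuel (PySem.Int.floordiv bottom 2, level - 1)
    else (bottom, level)

def get_3d_pos (n : Int) (D : Int) : Option (Int × Int × Int × Int) :=
  if n ≤ 0 then none
  else
    let D2 := D * D
    let s1 := pvLoopDouble D2 128 (n, 0)
    let s2 := pvLoopHalve D2 128 s1
    let bottom := s2.1
    let level := s2.2
    if D2 ≤ bottom ∧ bottom < 2 * D2 then
      let idx := bottom - D2
      some (PySem.Int.mod idx D, level, PySem.Int.floordiv idx D, bottom)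
    else none

-- ===== PORT B =====
-- Python's `2 ** level` and `n // 2 ** k` with the Nat-valued bit_length exponents B
-- produces are ported as Nat powers (exact: the exponents are nonnegative).
def get_3d_pos_alt (n : Int) (D : Int) : Option (Int × Int × Int × Int) :=
  if n ≤ 0 then none
  else
    let D2 := D * D
    let (bottom, level) :=
      if n < D2 then
        let k := PySem.Int.bitLength (PySem.Int.floordiv (D2 - 1) n)
        (n * 2 ^ k, (k : Int))
      else
        let k := PySem.Int.bitLength (PySem.Int.floordiv n D2) - 1
        (PySem.Int.floordiv n (2 ^ k), -(k : Int))
    let idx := bottom - D2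
    some (PySem.Int.mod idx D, level, PySem.Int.floordiv idx D, bottom)

-- ===== PRECONDITION & SPEC =====
-- Pre_ excludes n > 0 with D = 0: there A's halving loop never terminates (bottom //= 2
-- stays ≥ 0 = 2*D2 forever, Python A hangs), so A returns on exactly the inputs admitted here.
def Pre_get_3d_pos (n : Int) (D : Int) : Prop := n ≤ 0 ∨ D ≠ 0
instance (n : Int) (D : Int) : Decidable (Pre_get_3d_pos n D) := by unfold Pre_get_3d_pos; infer_instance
def pvWitness_get_3d_pos : Int × Int := (5, 3)

def Spec_get_3d_pos (n : Int) (D : Int) (out : Option (Int × Int × Int × Int)) : Prop := out = get_3d_pos_alt n D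
instance (n : Int) (D : Int) (out : Option (Int × Int × Int × Int)) : Decidable (Spec_get_3d_pos n D out) := by unfold Spec_get_3d_pos; infer_instance

-- ===== CLAIM (what is proved, stated in full; the proofs are below) =====
def Claim_equal_get_3d_pos : Prop := ∀ (n : Int) (D : Int), Dom_get_3d_pos n D → Pre_get_3d_pos n D → Spec_get_3d_pos n D (get_3d_pos n D)

-- ===== LEMMAS AND PROOFS =====

theorem pv_bl_pos (q : Int) (hq : 0 < q) : 1 ≤ PySem.Int.bitLength q := by
  rw [PySem.Int.bitLength_of_pos hq]; omega

theorem pv_fd_fd (a b c : Int) (hb : 0 < b) (hc : 0 < c) :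
    PySem.Int.floordiv (PySem.Int.floordiv a b) c = PySem.Int.floordiv a (b * c) := by
  have hbc : 0 < b * c := mul_pos hb hc
  have h1 := PySem.Int.floordiv_mul_add_mod a (b * c)
  have h2 := PySem.Int.mod_nonneg a hbc
  have h3 := PySem.Int.mod_lt a hbc
  rw [PySem.Int.floordiv_eq_iff_of_pos hc]
  constructor
  · rw [PySem.Int.le_floordiv_iff_mul_le hb]
    nlinarith
  · rw [PySem.Int.floordiv_lt_iff_lt_mul hb]
    nlinarith

theorem pvLoopDouble_id (D2 : Int) (fuel : Nat) (b l : Int) (h : ¬ b < D2) :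
    pvLoopDouble D2 fuel (b, l) = (b, l) := by
  cases fuel with
  | zero => rfl
  | succ f => simp [pvLoopDouble, h]

theorem pvLoopHalve_id (D2 : Int) (fuel : Nat) (b l : Int) (h : b < 2 * D2) :
    pvLoopHalve D2 fuel (b, l) = (b, l) := by
  cases fuel with
  | zero => rfl
  | succ f => simp [pvLoopHalve, not_le.mpr h]

theorem pvLoopDouble_eq (fuel : Nat) (D2 : Int) (hD2 : 1 ≤ D2) :
    ∀ (b l : Int), 0 < b → D2 ≤ b * 2 ^ fuel →
    pvLoopDouble D2 fuel (b, l) =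
      (b * 2 ^ PySem.Int.bitLength (PySem.Int.floordiv (D2 - 1) b),
       l + (PySem.Int.bitLength (PySem.Int.floordiv (D2 - 1) b) : Int)) := by
  induction fuel with
  | zero =>
    intro b l hb hfuel
    simp only [pow_zero, mul_one] at hfuel
    have hq : PySem.Int.floordiv (D2 - 1) b = 0 := by
      rw [PySem.Int.floordiv_eq_iff_of_pos hb]
      constructor <;> (ring_nf; omega)
    simp [pvLoopDouble, hq, PySem.Int.bitLength_zero]
  | succ fuel ih =>
    intro b l hb hfuel
    by_cases hlt : b < D2
    · have hstep : pvLoopDouble D2 (fuel + 1) (b, l) = pvLoopDouble D2 fuel (b * 2, l + 1) := by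
        simp [pvLoopDouble, hlt]
      have hfb : D2 ≤ (b * 2) * 2 ^ fuel := by
        calc D2 ≤ b * 2 ^ (fuel + 1) := hfuel
          _ = (b * 2) * 2 ^ fuel := by ring
      rw [hstep, ih (b * 2) (l + 1) (by linarith) hfb]
      have hq1 : 1 ≤ PySem.Int.floordiv (D2 - 1) b := by
        rw [PySem.Int.le_floordiv_iff_mul_le hb]; ring_nf; omega
      have hdiv : PySem.Int.floordiv (D2 - 1) (b * 2)
                = PySem.Int.floordiv (PySem.Int.floordiv (D2 - 1) b) 2 := by
        rw [pv_fd_fd (D2 - 1) b 2 hb (by norm_num)]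
      have hk : PySem.Int.bitLength (PySem.Int.floordiv (D2 - 1) b)
              = PySem.Int.bitLength (PySem.Int.floordiv (D2 - 1) (b * 2)) + 1 := by
        rw [hdiv]; exact PySem.Int.bitLength_of_pos (by omega)
      rw [hk]
      simp only [Prod.mk.injEq, pow_succ]
      constructor
      · ring
      · push_cast; ring
    · have hq : PySem.Int.floordiv (D2 - 1) b = 0 := by
        rw [PySem.Int.floordiv_eq_iff_of_pos hb]
        constructor <;> (ring_nf; omega)
      simp [pvLoopDouble, hlt, hq, PySem.Int.bitLength_zero]

theorem pvLoopHalve_eq (fuel : Nat) (D2 : Int) (hD2 : 1 ≤ D2) :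
    ∀ (b l : Int), D2 ≤ b → b < 2 * D2 * 2 ^ fuel →
    pvLoopHalve D2 fuel (b, l) =
      (PySem.Int.floordiv b (2 ^ (PySem.Int.bitLength (PySem.Int.floordiv b D2) - 1)),
       l - ((PySem.Int.bitLength (PySem.Int.floordiv b D2) - 1 : Nat) : Int)) := by
  have hD2pos : (0:Int) < D2 := by omega
  induction fuel with
  | zero =>
    intro b l hb hfuel
    simp only [pow_zero, mul_one] at hfuel
    have hq : PySem.Int.floordiv b D2 = 1 := by
      rw [PySem.Int.floordiv_eq_iff_of_pos hD2pos]
      constructor <;> (ring_nf; omega)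
    have hb1 : PySem.Int.bitLength (1 : Int) = 1 := by decide
    simp [pvLoopHalve, hq, hb1]
  | succ fuel ih =>
    intro b l hb hfuel
    by_cases hge : 2 * D2 ≤ b
    · have hstep : pvLoopHalve D2 (fuel + 1) (b, l)
                 = pvLoopHalve D2 fuel (PySem.Int.floordiv b 2, l - 1) := by
        simp [pvLoopHalve, hge]
      have hb2 : D2 ≤ PySem.Int.floordiv b 2 := by
        rw [PySem.Int.le_floordiv_iff_mul_le (by norm_num : (0:Int) < 2)]; ring_nf; omega
      have hf2 : PySem.Int.floordiv b 2 < 2 * D2 * 2 ^ fuel := by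
        rw [PySem.Int.floordiv_lt_iff_lt_mul (by norm_num : (0:Int) < 2)]
        calc b < 2 * D2 * 2 ^ (fuel + 1) := hfuel
          _ = 2 * D2 * 2 ^ fuel * 2 := by ring
      rw [hstep, ih _ _ hb2 hf2]
      have hq2 : 2 ≤ PySem.Int.floordiv b D2 := by
        rw [PySem.Int.le_floordiv_iff_mul_le hD2pos]; ring_nf; omega
      have hcomm : PySem.Int.floordiv (PySem.Int.floordiv b 2) D2
                 = PySem.Int.floordiv (PySem.Int.floordiv b D2) 2 := by
        rw [pv_fd_fd b 2 D2 (by norm_num) hD2pos, pv_fd_fd b D2 2 hD2pos (by norm_num), mul_comm]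
      have hq2' : 1 ≤ PySem.Int.floordiv (PySem.Int.floordiv b D2) 2 := by
        rw [PySem.Int.le_floordiv_iff_mul_le (by norm_num : (0:Int) < 2)]; ring_nf; omega
      have hk : PySem.Int.bitLength (PySem.Int.floordiv b D2)
              = PySem.Int.bitLength (PySem.Int.floordiv (PySem.Int.floordiv b 2) D2) + 1 := by
        rw [hcomm]; exact PySem.Int.bitLength_of_pos (by omega)
      have hm1 : 1 ≤ PySem.Int.bitLength (PySem.Int.floordiv (PySem.Int.floordiv b 2) D2) := by
        rw [hcomm]; exact pv_bl_pos _ (by omega)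
      obtain ⟨m', hm'⟩ : ∃ m', PySem.Int.bitLength (PySem.Int.floordiv (PySem.Int.floordiv b 2) D2) = m' + 1 :=
        ⟨PySem.Int.bitLength (PySem.Int.floordiv (PySem.Int.floordiv b 2) D2) - 1, by omega⟩
      rw [hk, hm']
      simp only [Nat.add_sub_cancel, Prod.mk.injEq]
      constructor
      · rw [pv_fd_fd b 2 ((2:Int) ^ m') (by norm_num) (by positivity)]
        congr 1
        rw [pow_succ]; ring
      · push_cast; ring
    · have hq : PySem.Int.floordiv b D2 = 1 := by
        rw [PySem.Int.floordiv_eq_iff_of_pos hD2pos]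
        constructor <;> (ring_nf; omega)
      have hb1 : PySem.Int.bitLength (1 : Int) = 1 := by decide
      simp [pvLoopHalve, hge, hq, hb1]

theorem pvDouble_bounds (D2 b : Int) (hb : 0 < b) (hbD : b < D2) :
    D2 ≤ b * 2 ^ PySem.Int.bitLength (PySem.Int.floordiv (D2 - 1) b) ∧
    b * 2 ^ PySem.Int.bitLength (PySem.Int.floordiv (D2 - 1) b) < 2 * D2 := by
  have hq1 : 1 ≤ PySem.Int.floordiv (D2 - 1) b := by
    rw [PySem.Int.le_floordiv_iff_mul_le hb]; ring_nf; omega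
  have hk1 : 1 ≤ PySem.Int.bitLength (PySem.Int.floordiv (D2 - 1) b) := pv_bl_pos _ (by omega)
  obtain ⟨k', hk'⟩ : ∃ k', PySem.Int.bitLength (PySem.Int.floordiv (D2 - 1) b) = k' + 1 :=
    ⟨PySem.Int.bitLength (PySem.Int.floordiv (D2 - 1) b) - 1, by omega⟩
  have habs : (((PySem.Int.floordiv (D2 - 1) b).natAbs : Int)) = PySem.Int.floordiv (D2 - 1) b :=
    Int.natAbs_of_nonneg (by omega)
  have hup : PySem.Int.floordiv (D2 - 1) b < 2 ^ (k' + 1) := by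
    have h := PySem.Int.lt_two_pow_bitLength (PySem.Int.floordiv (D2 - 1) b)
    rw [hk'] at h
    calc PySem.Int.floordiv (D2 - 1) b = _ := habs.symm
      _ < ((2 ^ (k' + 1) : Nat) : Int) := by exact_mod_cast h
      _ = (2:Int) ^ (k' + 1) := by push_cast; ring
  have hlow : (2:Int) ^ k' ≤ PySem.Int.floordiv (D2 - 1) b := by
    have h := PySem.Int.two_pow_bitLength_le (PySem.Int.floordiv (D2 - 1) b) (by omega)
    rw [hk'] at h
    simp only [Nat.add_sub_cancel] at h
    calc (2:Int) ^ k' = ((2 ^ k' : Nat) : Int) := by push_cast; ring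
      _ ≤ _ := by exact_mod_cast h
      _ = _ := habs
  rw [hk']
  constructor
  · have h1' := Int.add_one_le_iff.mpr ((PySem.Int.floordiv_lt_iff_lt_mul hb).mp hup)
    linarith [h1']
  · have h2 := (PySem.Int.le_floordiv_iff_mul_le hb).mp hlow
    rw [pow_succ]
    linarith [h2]

theorem pvHalve_bounds (D2 b : Int) (hD2 : 1 ≤ D2) (hb : D2 ≤ b) :
    D2 ≤ PySem.Int.floordiv b (2 ^ (PySem.Int.bitLength (PySem.Int.floordiv b D2) - 1)) ∧
    PySem.Int.floordiv b (2 ^ (PySem.Int.bitLength (PySem.Int.floordiv b D2) - 1)) < 2 * D2 := by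
  have hD2pos : (0:Int) < D2 := by omega
  have hq1 : 1 ≤ PySem.Int.floordiv b D2 := by
    rw [PySem.Int.le_floordiv_iff_mul_le hD2pos]; ring_nf; omega
  obtain ⟨m, hm⟩ : ∃ m, PySem.Int.bitLength (PySem.Int.floordiv b D2) = m + 1 :=
    ⟨PySem.Int.bitLength (PySem.Int.floordiv b D2) - 1,
     by have := pv_bl_pos (PySem.Int.floordiv b D2) (by omega); omega⟩
  have habs : (((PySem.Int.floordiv b D2).natAbs : Int)) = PySem.Int.floordiv b D2 :=
    Int.natAbs_of_nonneg (by omega)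
  have hup : PySem.Int.floordiv b D2 < 2 ^ (m + 1) := by
    have h := PySem.Int.lt_two_pow_bitLength (PySem.Int.floordiv b D2)
    rw [hm] at h
    calc PySem.Int.floordiv b D2 = _ := habs.symm
      _ < ((2 ^ (m + 1) : Nat) : Int) := by exact_mod_cast h
      _ = (2:Int) ^ (m + 1) := by push_cast; ring
  have hlow : (2:Int) ^ m ≤ PySem.Int.floordiv b D2 := by
    have h := PySem.Int.two_pow_bitLength_le (PySem.Int.floordiv b D2) (by omega)
    rw [hm] at h
    simp only [Nat.add_sub_cancel] at h
    calc (2:Int) ^ m = ((2 ^ m : Nat) : Int) := by push_cast; ring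
      _ ≤ _ := by exact_mod_cast h
      _ = _ := habs
  rw [hm]
  simp only [Nat.add_sub_cancel]
  have hpow : (0:Int) < 2 ^ m := by positivity
  constructor
  · rw [PySem.Int.le_floordiv_iff_mul_le hpow]
    have h := (PySem.Int.le_floordiv_iff_mul_le hD2pos).mp hlow
    linarith [h]
  · rw [PySem.Int.floordiv_lt_iff_lt_mul hpow]
    have hup2 : PySem.Int.floordiv b D2 < 2 ^ m * 2 := by rw [← pow_succ]; exact hup
    have h := (PySem.Int.floordiv_lt_iff_lt_mul hD2pos).mp hup2
    linarith [h]

-- ===== VERDICT (by name: the statement is the Claim_ definition above) =====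
theorem get_3d_pos_spec : Claim_equal_get_3d_pos := by
  intro n D hDom hPre
  unfold Spec_get_3d_pos
  simp only [Dom_get_3d_pos, pvDomInt, Bool.and_eq_true, decide_eq_true_eq] at hDom
  obtain ⟨⟨hn1, hn2⟩, hd1, hd2⟩ := hDom
  by_cases hn0 : n ≤ 0
  · simp [get_3d_pos, get_3d_pos_alt, hn0]
  · have hnpos : 0 < n := by omega
    have hD : D ≠ 0 := by
      rcases hPre with h | h
      · omega
      · exact h
    have hD2pos : 0 < D * D := mul_self_pos.mpr hD
    have hD2 : 1 ≤ D * D := by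
      have := Int.add_one_le_iff.mpr hD2pos
      simpa using this
    have hDD : D * D ≤ 4611686018427387904 := by
      nlinarith [mul_nonneg (sub_nonneg.mpr hd2) (by linarith : (0:Int) ≤ D + 2147483648)]
    simp only [get_3d_pos, get_3d_pos_alt, if_neg hn0]
    by_cases hcase : n < D * D
    · have hfuel : D * D ≤ n * 2 ^ 128 := by
        calc D * D ≤ 4611686018427387904 := hDD
          _ ≤ 1 * 2 ^ 128 := by norm_num
          _ ≤ n * 2 ^ 128 := mul_le_mul_of_nonneg_right (by omega) (by positivity)
      obtain ⟨hB1, hB2⟩ := pvDouble_bounds (D * D) n hnpos hcase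
      rw [pvLoopDouble_eq 128 (D * D) hD2 n 0 hnpos hfuel,
          pvLoopHalve_id (D * D) 128 _ _ hB2]
      simp [hB1, hB2, hcase]
    · have hge : D * D ≤ n := not_lt.mp hcase
      have hfuel2 : n < 2 * (D * D) * 2 ^ 128 := by
        calc n ≤ 2147483648 := hn2
          _ < 2 * 1 * 2 ^ 128 := by norm_num
          _ ≤ 2 * (D * D) * 2 ^ 128 := by
              have h1 : (2:Int) * 1 ≤ 2 * (D * D) := by linarith
              exact mul_le_mul_of_nonneg_right h1 (by positivity)
      obtain ⟨hB1, hB2⟩ := pvHalve_bounds (D * D) n hD2 hge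
      rw [pvLoopDouble_id (D * D) 128 n 0 hcase,
          pvLoopHalve_eq 128 (D * D) hD2 n 0 hge hfuel2]
      have hB1' : D * D ≤ n / 2 ^ (PySem.Int.bitLength (PySem.Int.floordiv n (D * D)) - 1) := by
        rw [← PySem.Int.floordiv_eq_ediv_of_pos (by positivity)]; exact hB1
      have hB2' : n / 2 ^ (PySem.Int.bitLength (PySem.Int.floordiv n (D * D)) - 1) < 2 * (D * D) := by
        rw [← PySem.Int.floordiv_eq_ediv_of_pos (by positivity)]; exact hB2
      simp [hB1', hB2', hcase]
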